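-- pv_equiv track=rewrite | github.com/stereoit/dAuction2_interactive3 | dAuction2/views.py | accumulator
-- ===== SOURCE A (Python) =====
-- def accumulator(zz):
--     qq=[]
--     length=len(zz)
--     prevCum=0
--     if length==0:
--         pass
--     elif length==1:
--         qq=zz
--     elif length>1:
--         for i in range(0,len(zz)-1):
--             if zz[i][0] !=zz[i+1][0]:
--                 qq.append((zz[i][0],zz[i][2]-prevCum,zz[i][2]))
--                 prevCum=zz[i][2]
--         qq.append((zz[i+1][0],zz[i+1][2]-prevCum,zz[i+1][2]))
--     else:
--         pass
--     return qq
-- ===== SOURCE B (Python) =====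
-- def accumulator(zz):
--     if len(zz) <= 1:
--         return list(zz)
--     # staged: right-to-left keep the closing element of each run of equal first
--     # fields, then compute the differences by zipping with the shifted cumulatives
--     lasts = []
--     for e in reversed(zz):
--         if not lasts or lasts[-1][0] != e[0]:
--             lasts.append(e)
--     lasts.reverse()
--     cums = [e[2] for e in lasts]
--     return [(e[0], c - p, c) for e, c, p in zip(lasts, cums, [0] + cums)]
-- ===== Notes on version B (the rewrite author's own statement) =====
-- stated objective: alternative
-- what changed: Replaces A's single forward index scan with a running prevCum accumulator by a staged pipeline: a right-to-left pass keeps the closing element of each run of equal first fields, then the cumulative column is extracted and the differences are produced by zipping it with its 0-shifted copy (no running accumulator, different traversal direction).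
import Mathlib
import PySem

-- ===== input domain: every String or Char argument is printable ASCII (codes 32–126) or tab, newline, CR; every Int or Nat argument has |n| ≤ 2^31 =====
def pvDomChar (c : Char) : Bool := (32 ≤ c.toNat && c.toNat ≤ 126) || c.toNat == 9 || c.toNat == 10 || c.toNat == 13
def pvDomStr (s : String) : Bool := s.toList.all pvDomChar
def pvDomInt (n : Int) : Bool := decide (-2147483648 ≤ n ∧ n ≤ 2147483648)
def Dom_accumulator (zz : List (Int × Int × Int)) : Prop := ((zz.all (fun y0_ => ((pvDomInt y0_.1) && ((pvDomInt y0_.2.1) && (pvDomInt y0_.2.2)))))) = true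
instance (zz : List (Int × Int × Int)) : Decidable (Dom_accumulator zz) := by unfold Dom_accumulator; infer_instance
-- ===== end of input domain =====

-- B replaces A's single forward scan with a running accumulator by a staged pipeline:
-- a right-to-left pass keeping each run's closing element, then a zip of the cumulative
-- column with its 0-shifted copy (alternative decomposition, same cost).

-- ===== PORT A =====
-- loop body of A's 'for i in range(0, len(zz)-1)' (indices are always in range, so pyGetD's default is never used)
def stepA (zz : List (Int × Int × Int)) (s : List (Int × Int × Int) × Int) (i : Int) :
    List (Int × Int × Int) × Int :=
  let a := PySem.List.pyGetD zz i (0, 0, 0)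
  let b := PySem.List.pyGetD zz (i + 1) (0, 0, 0)
  if a.1 ≠ b.1 then (s.1 ++ [(a.1, a.2.2 - s.2, a.2.2)], a.2.2) else s

def accumulator (zz : List (Int × Int × Int)) : List (Int × Int × Int) :=
  if zz.length = 0 then []
  else if zz.length = 1 then zz
  else
    let r := (PySem.List.pyRange 0 ((zz.length : Int) - 1) 1).foldl (stepA zz) ([], 0)
    -- final 'qq.append((zz[i+1][0], ...))' with the leftover loop index i = len-2, i.e. zz[len-1]
    let e := PySem.List.pyGetD zz ((zz.length : Int) - 1) (0, 0, 0)
    r.1 ++ [(e.1, e.2.2 - r.2, e.2.2)]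

-- ===== PORT B =====
-- body of Source B's 'for e in reversed(zz)': keep e if lasts is empty or its last kept key differs
def keepRevStep (lasts : List (Int × Int × Int)) (e : Int × Int × Int) :
    List (Int × Int × Int) :=
  if lasts = [] ∨ ¬ lasts.getLast?.map (·.1) = some e.1 then lasts ++ [e] else lasts

def accumulator_alt (zz : List (Int × Int × Int)) : List (Int × Int × Int) :=
  if zz.length ≤ 1 then zz
  else
    let lasts := (zz.reverse.foldl keepRevStep []).reverse
    let cums := lasts.map (·.2.2)
    (lasts.zip (cums.zip (0 :: cums))).map (fun p => (p.1.1, p.2.1 - p.2.2, p.2.1))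

-- ===== PRECONDITION & SPEC =====
def Spec_accumulator (zz : List (Int × Int × Int)) (out : List (Int × Int × Int)) : Prop := out = accumulator_alt zz
instance (zz : List (Int × Int × Int)) (out : List (Int × Int × Int)) : Decidable (Spec_accumulator zz out) := by unfold Spec_accumulator; infer_instance

-- ===== CLAIM (what is proved, stated in full; the proofs are below) =====
def Claim_equal_accumulator : Prop := ∀ (zz : List (Int × Int × Int)), Dom_accumulator zz → Spec_accumulator zz (accumulator zz)

-- ===== LEMMAS AND PROOFS =====

-- common specification: cumulative-difference tuples at run boundaries
def fspec (prev : Int) : List (Int × Int × Int) → List (Int × Int × Int)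
  | [] => []
  | [e] => [(e.1, e.2.2 - prev, e.2.2)]
  | a :: b :: t =>
    if a.1 ≠ b.1 then (a.1, a.2.2 - prev, a.2.2) :: fspec a.2.2 (b :: t)
    else fspec prev (b :: t)

-- the run-closers, computed front-to-back by consing (proof-side mirror of B's reversed pass)
def step2 (e : Int × Int × Int) (acc : List (Int × Int × Int)) : List (Int × Int × Int) :=
  if ¬ acc.head?.map (·.1) = some e.1 then e :: acc else acc

def k2 (l : List (Int × Int × Int)) : List (Int × Int × Int) := l.foldr step2 []

-- the diff pass as a recursion with a carried previous cumulative
def diffmap (prev : Int) : List (Int × Int × Int) → List (Int × Int × Int)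
  | [] => []
  | e :: t => (e.1, e.2.2 - prev, e.2.2) :: diffmap e.2.2 t

-- ===== A-side: accumulator = fspec 0 =====

lemma foldA_shift (x : Int × Int × Int) (zz : List (Int × Int × Int)) (m : ℕ) :
    ∀ (st : List (Int × Int × Int) × Int),
      (PySem.List.pyRange 1 ((m : Int) + 1) 1).foldl (stepA (x :: zz)) st
        = (PySem.List.pyRange 0 (m : Int) 1).foldl (stepA zz) st := by
  intro st
  rw [PySem.List.pyRange_one, PySem.List.pyRange_one]
  have h1 : (((m : Int) + 1) - 1).toNat = m := by omega
  have h2 : ((m : Int) - 0).toNat = m := by omega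
  rw [h1, h2, List.foldl_map, List.foldl_map]
  have hfun : (fun (s : List (Int × Int × Int) × Int) (k : ℕ) => stepA (x :: zz) s (1 + (k : Int)))
      = (fun (s : List (Int × Int × Int) × Int) (k : ℕ) => stepA zz s (0 + (k : Int))) := by
    funext s k
    have gB : PySem.List.pyGetD (x :: zz) (1 + (k : Int) + 1) (0, 0, 0)
        = PySem.List.pyGetD zz ((k : Int) + 1) (0, 0, 0) := by
      have h2 : (1 : Int) + (k : Int) + 1 = ((k + 2 : ℕ) : Int) := by push_cast; ring
      have h3 : ((k : Int)) + 1 = ((k + 1 : ℕ) : Int) := by push_cast; ring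
      rw [h2, h3, PySem.List.pyGetD_natCast, PySem.List.pyGetD_natCast]
      simp [List.getD]
    have gA : PySem.List.pyGetD (x :: zz) (1 + (k : Int)) (0, 0, 0)
        = PySem.List.pyGetD zz ((k : Int)) (0, 0, 0) := by
      have h1 : (1 : Int) + (k : Int) = ((k + 1 : ℕ) : Int) := by push_cast; ring
      rw [h1, PySem.List.pyGetD_natCast, PySem.List.pyGetD_natCast]
      simp [List.getD]
    simp only [stepA, zero_add, gB, gA]
  rw [hfun]

lemma foldA (l : List (Int × Int × Int)) :
    ∀ (a : Int × Int × Int) (prev : Int) (acc : List (Int × Int × Int)),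
      (((PySem.List.pyRange 0 (l.length : Int) 1).foldl (stepA (a :: l)) (acc, prev)).1
          ++ [((PySem.List.pyGetD (a :: l) (l.length : Int) (0, 0, 0)).1,
               (PySem.List.pyGetD (a :: l) (l.length : Int) (0, 0, 0)).2.2
                 - ((PySem.List.pyRange 0 (l.length : Int) 1).foldl (stepA (a :: l)) (acc, prev)).2,
               (PySem.List.pyGetD (a :: l) (l.length : Int) (0, 0, 0)).2.2)])
        = acc ++ fspec prev (a :: l) := by
  induction l with
  | nil =>
    intro a prev acc
    simp [PySem.List.pyRange_one_eq_nil (le_refl (0 : Int)), fspec, PySem.List.pyGetD_zero_cons]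
  | cons b t ih =>
    intro a prev acc
    have hlen : ((b :: t).length : Int) = (t.length : Int) + 1 := by simp
    rw [hlen, PySem.List.pyRange_one_cons (by omega : (0:Int) < (t.length : Int) + 1)]
    have hstep0 : stepA (a :: b :: t) (acc, prev) 0
        = if a.1 ≠ b.1 then (acc ++ [(a.1, a.2.2 - prev, a.2.2)], a.2.2) else (acc, prev) := by
      simp only [stepA, zero_add]
      have g0 : PySem.List.pyGetD (a :: b :: t) 0 (0,0,0) = a := PySem.List.pyGetD_zero_cons _ _ _
      have g1 : PySem.List.pyGetD (a :: b :: t) 1 (0,0,0) = b := by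
        have : (1 : Int) = ((1 : ℕ) : Int) := by norm_num
        rw [this, PySem.List.pyGetD_natCast]; rfl
      rw [g0, g1]
    have hget : PySem.List.pyGetD (a :: b :: t) ((t.length : Int) + 1) (0,0,0)
        = PySem.List.pyGetD (b :: t) (t.length : Int) (0,0,0) := by
      have e : (t.length : Int) + 1 = ((t.length + 1 : ℕ) : Int) := by push_cast; ring
      rw [e, PySem.List.pyGetD_natCast, PySem.List.pyGetD_natCast]
      rfl
    rw [List.foldl_cons, hstep0]
    simp only [zero_add]
    rw [foldA_shift a (b :: t) t.length, hget]
    by_cases hab : a.1 = b.1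
    · rw [if_neg (by simp [hab])]
      rw [ih b prev acc]
      simp [fspec, hab]
    · rw [if_pos (by simpa using hab)]
      rw [ih b a.2.2 (acc ++ [(a.1, a.2.2 - prev, a.2.2)])]
      simp [fspec, hab]

lemma acc_eq_fspec (a b : Int × Int × Int) (t : List (Int × Int × Int)) :
    accumulator (a :: b :: t) = fspec 0 (a :: b :: t) := by
  unfold accumulator
  rw [if_neg (by simp), if_neg (by simp)]
  have hlen : (((a :: b :: t).length : Int)) - 1 = ((b :: t).length : Int) := by
    push_cast [List.length_cons]; ring
  simp only [hlen]
  exact foldA (b :: t) a 0 []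

-- ===== B-side: accumulator_alt = fspec 0 =====

-- the reversed append-pass, once reversed back, is the cons-pass k2
lemma revfold_eq_k2 (zz : List (Int × Int × Int)) :
    (zz.reverse.foldl keepRevStep []).reverse = k2 zz := by
  rw [List.foldl_reverse]
  induction zz with
  | nil => rfl
  | cons a t ih =>
    have hA : t.foldr (fun x y => keepRevStep y x) [] = (k2 t).reverse := by
      rw [← ih, List.reverse_reverse]
    show (keepRevStep (t.foldr (fun x y => keepRevStep y x) []) a).reverse = k2 (a :: t)
    rw [hA]
    have hk2 : k2 (a :: t) = step2 a (k2 t) := rfl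
    rw [hk2]
    unfold keepRevStep step2
    by_cases hc : (k2 t).head?.map (·.1) = some a.1
    · have hne : ¬ (k2 t).reverse = [] := by
        intro h
        rw [List.reverse_eq_nil_iff] at h
        simp [h] at hc
      have hcond : ¬ ((k2 t).reverse = [] ∨ ¬ ((k2 t).reverse.getLast?.map (·.1) = some a.1)) := by
        simp only [not_or, not_not]
        exact ⟨hne, by rwa [List.getLast?_reverse]⟩
      rw [if_neg hcond, if_neg (by simpa using hc), List.reverse_reverse]
    · rw [if_pos, if_pos (by simpa using hc)]
      · simp
      · right
        rwa [List.getLast?_reverse]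

-- head key of k2 (b :: t) is b's key
lemma k2_headkey (t : List (Int × Int × Int)) :
    ∀ b, (k2 (b :: t)).head?.map (·.1) = some b.1 := by
  induction t with
  | nil => intro b; rfl
  | cons c t' ih =>
    intro b
    show (step2 b (k2 (c :: t'))).head?.map (·.1) = some b.1
    unfold step2
    by_cases hc : (k2 (c :: t')).head?.map (·.1) = some b.1
    · rw [if_neg (by simpa using hc)]; exact hc
    · rw [if_pos (by simpa using hc)]; rfl

-- fspec = diffmap over the run-closers
lemma fspec_eq_diffmap_k2 (l : List (Int × Int × Int)) :
    ∀ prev, fspec prev l = diffmap prev (k2 l) := by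
  induction l with
  | nil => intro prev; rfl
  | cons a t ih =>
    intro prev
    cases t with
    | nil => simp [fspec, k2, step2, diffmap]
    | cons b t' =>
      have hhd := k2_headkey t' b
      show fspec prev (a :: b :: t') = diffmap prev (step2 a (k2 (b :: t')))
      unfold step2
      by_cases hab : a.1 = b.1
      · rw [if_neg (by simp [hhd, hab])]
        simp only [fspec, hab]
        rw [if_neg (by simp)]
        exact ih prev
      · rw [if_pos (by simp [hhd]; exact fun h => hab h.symm)]
        simp only [fspec]
        rw [if_pos (by simpa using hab)]
        simp only [diffmap]
        rw [ih a.2.2]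

-- the zip-with-shifted-cumulatives pass equals diffmap
lemma zip_eq_diffmap (L : List (Int × Int × Int)) :
    ∀ prev, ((L.zip ((L.map (·.2.2)).zip (prev :: L.map (·.2.2)))).map
        (fun p => (p.1.1, p.2.1 - p.2.2, p.2.1))) = diffmap prev L := by
  induction L with
  | nil => intro prev; rfl
  | cons e t ih =>
    intro prev
    simp only [List.map_cons, List.zip_cons_cons, diffmap]
    rw [ih e.2.2]

lemma alt_eq_fspec (a b : Int × Int × Int) (t : List (Int × Int × Int)) :
    accumulator_alt (a :: b :: t) = fspec 0 (a :: b :: t) := by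
  unfold accumulator_alt
  rw [if_neg (by simp)]
  rw [revfold_eq_k2, zip_eq_diffmap, fspec_eq_diffmap_k2]

-- ===== VERDICT (by name: the statement is the Claim_ definition above) =====
theorem accumulator_spec : Claim_equal_accumulator := by
  intro zz _
  unfold Spec_accumulator
  match zz with
  | [] => rfl
  | [a] => rfl
  | a :: b :: t => rw [acc_eq_fspec, alt_eq_fspec]
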